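-- pv_equiv track=rewrite | github.com/aneeshsunganahalli/LC-Solutions | Graphs/AllPossibleRecipes.py | findAllRecipes
-- ===== SOURCE A (Python) =====
-- from typing import List
--
-- def findAllRecipes(recipes: List[str], ingredients: List[List[str]], supplies: List[str]) -> List[str]:
--
--     canCook = {s:True for s in supplies}    # Hash Map to store recipes that can be cooked, supplies are available so they can technically be cooked, recipe -> True/False
--     recipe_index = {r:i for i,r in enumerate(recipes)} # Hash Map to get the index of a recipe, key -> value is recipe -> index
--
--     def dfs(r):  # Main DFS function
--         if r in canCook:
--             return canCook[r]  # Return whether we know if it can be cooked or not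
--
--         if r not in recipe_index: # If r isn't in canCook it's not a supply and if its not in recipes either, then we can't cook
--             return False
--
--         canCook[r] = False # If two recipes depend on each other neither can be cooked, so we intialise to false
--
--         for nei in ingredients[recipe_index[r]]: # We check neighbours of r and apply dfs
--             if not dfs(nei): # If neighbour ingredients not available, then can't cook
--                 return False
--
--         canCook[r] = True # If all checked, then we can cook
--         return canCook[r]
--
--
--     res = []
--     for r in recipes:
--         if dfs(r):
--             res.append(r) # Append all recipes that can be cooked
--     return res
-- ===== SOURCE B (Python) =====
-- def findAllRecipes(recipes, ingredients, supplies):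
--     # Round-based saturation instead of DFS memoization: keep the set of
--     # obtainable items and repeatedly sweep the recipe table (last duplicate
--     # wins, as in a dict), adding any recipe whose ingredients are all
--     # obtainable; len(recipes)+1 sweeps reach the fixed point.
--     info = {}
--     for r, ing in zip(recipes, ingredients):
--         info[r] = ing
--     available = set(supplies)
--     for _ in range(len(recipes) + 1):
--         for r, ing in info.items():
--             if r not in available and all(x in available for x in ing):
--                 available.add(r)
--     return [r for r in recipes if r in available]
-- ===== Notes on version B (the rewrite author's own statement) =====
-- stated objective: alternative
-- what changed: Replaces the recursive DFS with memoization and cycle marking by an iterative round-based fixed-point saturation: build the recipe table (last duplicate wins), then repeatedly sweep it adding every recipe whose ingredients are all obtainable until the fixed point is reached.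
import Mathlib
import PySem

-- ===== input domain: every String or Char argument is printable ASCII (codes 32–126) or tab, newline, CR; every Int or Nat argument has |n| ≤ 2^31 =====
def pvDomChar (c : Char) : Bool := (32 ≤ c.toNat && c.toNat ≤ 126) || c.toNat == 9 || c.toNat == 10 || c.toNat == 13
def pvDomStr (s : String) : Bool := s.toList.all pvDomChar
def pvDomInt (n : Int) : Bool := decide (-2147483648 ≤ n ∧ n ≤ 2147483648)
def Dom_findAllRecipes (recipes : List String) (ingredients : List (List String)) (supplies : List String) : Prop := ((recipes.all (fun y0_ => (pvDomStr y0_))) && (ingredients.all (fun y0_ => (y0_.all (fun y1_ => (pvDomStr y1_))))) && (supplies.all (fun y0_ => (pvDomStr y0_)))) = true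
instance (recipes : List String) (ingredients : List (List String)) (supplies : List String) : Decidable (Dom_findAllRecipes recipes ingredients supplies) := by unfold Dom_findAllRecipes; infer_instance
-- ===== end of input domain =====

-- B replaces A's recursive DFS-with-memoization by an iterative round-based
-- fixed-point saturation over the recipe table (objective: alternative algorithm).

-- ===== PORT A =====
-- canCook = {s: True for s in supplies}
def pvCanCook0 (supplies : List String) : PySem.Dict String Bool :=
  supplies.foldl (fun d s => d.insert s true) PySem.Dict.empty

-- recipe_index = {r: i for i, r in enumerate(recipes)}
def pvRidx (recipes : List String) : PySem.Dict String Int :=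
  (PySem.List.enumerate recipes).foldl (fun d p => d.insert p.2 p.1) PySem.Dict.empty

-- dfs(r), threading the mutable dict canCook; the Nat argument is a fuel guard
-- making the recursion structural (the fuel supplied at the call site is proved
-- sufficient below, so the 0-branch is never reached on admitted inputs).
mutual
def pvDfsA (ingredients : List (List String)) (ridx : PySem.Dict String Int) :
    Nat → String → PySem.Dict String Bool → Bool × PySem.Dict String Bool
  | 0, _, c => (false, c)
  | Nat.succ fuel, r, c =>
    match c.get? r with
    | some b => (b, c)                         -- if r in canCook: return canCook[r]
    | none =>
      match ridx.get? r with
      | none => (false, c)                     -- if r not in recipe_index: return False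
      | some i =>
        let c1 := c.insert r false             -- canCook[r] = False
        match PySem.List.pyGet? ingredients i with
        | none => (false, c1)                  -- Python raises IndexError here; excluded by Pre_
        | some l =>
          match pvDfsALoop ingredients ridx fuel l c1 with
          | (false, c2) => (false, c2)         -- if not dfs(nei): return False
          | (true, c2) => (true, c2.insert r true)   -- canCook[r] = True; return canCook[r]
termination_by fuel r c => (fuel, 0)
def pvDfsALoop (ingredients : List (List String)) (ridx : PySem.Dict String Int) :
    Nat → List String → PySem.Dict String Bool → Bool × PySem.Dict String Bool
  | _, [], c => (true, c)
  | fuel, n :: rest, c =>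
    match pvDfsA ingredients ridx fuel n c with
    | (false, c') => (false, c')
    | (true, c') => pvDfsALoop ingredients ridx fuel rest c'
termination_by fuel l c => (fuel, l.length + 1)
end

def findAllRecipes (recipes : List String) (ingredients : List (List String)) (supplies : List String) : List String :=
  let canCook := pvCanCook0 supplies
  let ridx := pvRidx recipes
  (recipes.foldl (fun (st : PySem.Dict String Bool × List String) r =>
      let p := pvDfsA ingredients ridx (recipes.length + 1) r st.1
      (p.2, if p.1 then st.2 ++ [r] else st.2)) (canCook, [])).2

-- ===== PORT B =====
-- info = {}; for r, ing in zip(recipes, ingredients): info[r] = ing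
def pvInfo (recipes : List String) (ingredients : List (List String)) : PySem.Dict String (List String) :=
  (recipes.zip ingredients).foldl (fun d p => d.insert p.1 p.2) PySem.Dict.empty

-- one sweep of the inner for-loop over info.items()
def pvPass (info : PySem.Dict String (List String)) (av : PySem.Set String) : PySem.Set String :=
  info.items.foldl (fun av p =>
    if !(PySem.Set.contains av p.1) && p.2.all (fun x => PySem.Set.contains av x)
    then PySem.Set.add av p.1 else av) av

def findAllRecipes_alt (recipes : List String) (ingredients : List (List String)) (supplies : List String) : List String :=
  let info := pvInfo recipes ingredients
  let available0 : PySem.Set String := PySem.Set.ofList supplies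
  let final := (PySem.List.pyRange 0 ((recipes.length : Int) + 1) 1).foldl
      (fun av _ => pvPass info av) available0
  recipes.filter (fun r => PySem.Set.contains final r)

-- ===== PRECONDITION & SPEC =====
-- Pre_ excludes exactly the inputs where Python A raises IndexError: a recipe name
-- whose last occurrence sits at an index beyond len(ingredients) and that is not a supply.
def Pre_findAllRecipes (recipes : List String) (ingredients : List (List String)) (supplies : List String) : Prop :=
  ∀ i, (h : i < recipes.length) → ingredients.length ≤ i →
    recipes[i] ∈ supplies ∨ recipes[i] ∈ recipes.drop (i + 1)
instance (recipes : List String) (ingredients : List (List String)) (supplies : List String) : Decidable (Pre_findAllRecipes recipes ingredients supplies) := by unfold Pre_findAllRecipes; infer_instance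

def pvWitness_findAllRecipes : List String × List (List String) × List String :=
  (["cake", "mix"], [["egg", "mix"], ["flour"]], ["egg", "flour"])

def Spec_findAllRecipes (recipes : List String) (ingredients : List (List String)) (supplies : List String) (out : List String) : Prop := out = findAllRecipes_alt recipes ingredients supplies
instance (recipes : List String) (ingredients : List (List String)) (supplies : List String) (out : List String) : Decidable (Spec_findAllRecipes recipes ingredients supplies out) := by unfold Spec_findAllRecipes; infer_instance

-- ===== CLAIM (what is proved, stated in full; the proofs are below) =====
def Claim_equal_findAllRecipes : Prop := ∀ (recipes : List String) (ingredients : List (List String)) (supplies : List String), Dom_findAllRecipes recipes ingredients supplies → Pre_findAllRecipes recipes ingredients supplies → Spec_findAllRecipes recipes ingredients supplies (findAllRecipes recipes ingredients supplies)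

-- ===== LEMMAS AND PROOFS =====

-- The common functional spec: f(r) = the ingredient list A reads for recipe r.
def pvF (recipes : List String) (ingredients : List (List String)) (r : String) : Option (List String) :=
  match (pvRidx recipes).get? r with
  | none => none
  | some i => PySem.List.pyGet? ingredients i

-- cookability in at most k derivation rounds (the least fixed point, stratified)
def pvCookN (recipes : List String) (ingredients : List (List String)) (supplies : List String) :
    Nat → String → Prop
  | 0, s => s ∈ supplies
  | Nat.succ k, s => s ∈ supplies ∨
      ∃ l, pvF recipes ingredients s = some l ∧ ∀ x ∈ l, pvCookN recipes ingredients supplies k x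

def pvCook (recipes : List String) (ingredients : List (List String)) (supplies : List String) (s : String) : Prop :=
  ∃ k, pvCookN recipes ingredients supplies k s

-- dependency edge: non-supply recipe x needs y
def pvE (recipes : List String) (ingredients : List (List String)) (supplies : List String) (x y : String) : Prop :=
  x ∉ supplies ∧ ∃ l, pvF recipes ingredients x = some l ∧ y ∈ l

def pvReach (recipes : List String) (ingredients : List (List String)) (supplies : List String) : String → String → Prop :=
  Relation.ReflTransGen (pvE recipes ingredients supplies)

-- justification of a False entry under in-progress stack Γ
def pvFb (recipes : List String) (ingredients : List (List String)) (supplies : List String)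
    (Γ : List String) (s : String) : Prop :=
  ¬ pvCook recipes ingredients supplies s ∨ ∃ g ∈ Γ, pvReach recipes ingredients supplies s g

-- invariant on the memo dict during the DFS
def pvInv (recipes : List String) (ingredients : List (List String)) (supplies : List String)
    (Γ : List String) (c : PySem.Dict String Bool) : Prop :=
  (∀ s ∈ supplies, c.get? s = some true) ∧
  (∀ s, c.get? s = some true → pvCook recipes ingredients supplies s) ∧
  (∀ s, c.get? s = some false → pvFb recipes ingredients supplies Γ s)

def pvMeas (recipes : List String) (c : PySem.Dict String Bool) : Nat :=
  ((PySem.List.dedup recipes).filter (fun r => !(c.contains r))).length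

-- ---- generic list/dict helpers ----

theorem pv_filter_not_length_le {α : Type} (l : List α) (p q : α → Bool)
    (hmono : ∀ x ∈ l, p x = true → q x = true) :
    (l.filter (fun x => !(q x))).length ≤ (l.filter (fun x => !(p x))).length := by
  induction l with
  | nil => simp
  | cons x xs ih =>
    have hx := hmono x (by simp)
    have ih' := ih (fun y hy h => hmono y (List.mem_cons_of_mem _ hy) h)
    cases hq : q x <;> cases hp : p x <;>
      simp [List.filter_cons, hq, hp] at hx ⊢ <;> omega

theorem pv_filter_not_length_lt {α : Type} (l : List α) (p q : α → Bool)
    (hnd : l.Nodup) (hmono : ∀ x ∈ l, p x = true → q x = true)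
    (r : α) (hr : r ∈ l) (hpr : p r = false) (hqr : q r = true) :
    (l.filter (fun x => !(q x))).length < (l.filter (fun x => !(p x))).length := by
  induction l with
  | nil => simp at hr
  | cons x xs ih =>
    have hmono' : ∀ y ∈ xs, p y = true → q y = true :=
      fun y hy h => hmono y (List.mem_cons_of_mem _ hy) h
    have hle := pv_filter_not_length_le xs p q hmono'
    rcases List.mem_cons.mp hr with hxr | hrx
    · subst hxr
      simp [List.filter_cons, hpr, hqr]
      omega
    · have hlt := ih hnd.of_cons hmono' hrx
      have hx := hmono x (by simp)
      cases hq : q x <;> cases hp : p x <;>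
        simp [List.filter_cons, hq, hp] at hx ⊢ <;> omega

theorem pv_get?_foldl_insert_pairs {κ ν : Type} [BEq κ] [LawfulBEq κ]
    (ps : List (κ × ν)) (k : κ) (v : ν) :
    ((ps.foldl (fun d p => d.insert p.1 p.2) PySem.Dict.empty).get? k = some v ↔
      ∃ m, ∃ h : m < ps.length, ps[m] = (k, v) ∧
        ∀ j, m < j → (hj : j < ps.length) → (ps[j]).1 ≠ k) := by
  classical
  induction ps using List.reverseRecOn with
  | nil => simp [PySem.Dict.get?_empty]
  | append_singleton qs q ih =>
    rw [List.foldl_append]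
    simp only [List.foldl_cons, List.foldl_nil]
    by_cases hk : k = q.1
    · subst hk
      rw [PySem.Dict.get?_insert_self]
      constructor
      · rintro h
        injection h with h; subst h
        refine ⟨qs.length, by simp, by simp, ?_⟩
        intro j hj hj2 _
        simp at hj2; omega
      · rintro ⟨m, hm, hps, htail⟩
        rcases Nat.lt_or_ge m qs.length with hlt | hge
        · exfalso
          have := htail qs.length (by omega) (by simp)
          apply this
          simp [List.getElem_append_right, Nat.le_refl]
        · have hmq : m = qs.length := by simp at hm; omega
          subst hmq
          have : (qs ++ [q])[qs.length] = q := by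
            simp [List.getElem_append_right, Nat.le_refl]
          rw [this] at hps
          exact congrArg some (congrArg Prod.snd hps)
    · rw [PySem.Dict.get?_insert_of_ne _ q.2 hk]
      rw [ih]
      constructor
      · rintro ⟨m, hm, hps, htail⟩
        refine ⟨m, by simp; omega, ?_, ?_⟩
        · rw [List.getElem_append_left hm]; exact hps
        · intro j hj hj2
          rcases Nat.lt_or_ge j qs.length with hlt | hge
          · rw [List.getElem_append_left hlt]; exact htail j hj hlt
          · have hjq : j = qs.length := by simp at hj2; omega
            subst hjq
            have : (qs ++ [q])[qs.length] = q := by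
              simp [List.getElem_append_right, Nat.le_refl]
            rw [this]
            exact fun h => hk h.symm
      · rintro ⟨m, hm, hps, htail⟩
        have hmlt : m < qs.length := by
          rcases Nat.lt_or_ge m qs.length with hlt | hge
          · exact hlt
          · exfalso
            have hmq : m = qs.length := by simp at hm; omega
            subst hmq
            have : (qs ++ [q])[qs.length] = q := by
              simp [List.getElem_append_right, Nat.le_refl]
            rw [this] at hps
            exact hk (congrArg Prod.fst hps).symm
        refine ⟨m, hmlt, ?_, ?_⟩
        · rw [List.getElem_append_left hmlt] at hps; exact hps
        · intro j hj hj2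
          have := htail j hj (by simp; omega)
          rw [List.getElem_append_left (by omega : j < qs.length)] at this
          exact this

theorem pv_foldl_insert_true_get? (l : List String) (d : PySem.Dict String Bool) (x : String) :
    (l.foldl (fun d s => d.insert s true) d).get? x =
      if x ∈ l then some true else d.get? x := by
  classical
  induction l generalizing d with
  | nil => simp
  | cons s l ih =>
    simp only [List.foldl_cons]
    rw [ih]
    by_cases hxl : x ∈ l <;> by_cases hxs : x = s <;>
      simp [hxl, hxs, PySem.Dict.get?_insert_self]
    · exact PySem.Dict.get?_insert_of_ne _ _ hxs

theorem pv_canCook0_get? (supplies : List String) (x : String) :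
    (pvCanCook0 supplies).get? x = if x ∈ supplies then some true else none := by
  unfold pvCanCook0
  rw [pv_foldl_insert_true_get?]
  simp [PySem.Dict.get?_empty]

theorem pv_ridx_some_spec (recipes : List String) (r : String) (i : Int)
    (h : (pvRidx recipes).get? r = some i) :
    ∃ n : Nat, i = (n : Int) ∧ ∃ hn : n < recipes.length,
      recipes[n] = r ∧ r ∉ recipes.drop (n + 1) := by
  have hfold : pvRidx recipes =
      (((PySem.List.enumerate recipes).map (fun p => (p.2, p.1))).foldl
        (fun d p => d.insert p.1 p.2) PySem.Dict.empty) := by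
    unfold pvRidx
    rw [List.foldl_map]
  rw [hfold] at h
  obtain ⟨m, hm, hps, htail⟩ := (pv_get?_foldl_insert_pairs _ r i).mp h
  have hlen : ((PySem.List.enumerate recipes).map (fun p => (p.2, p.1))).length = recipes.length := by
    simp [PySem.List.length_enumerate]
  have hmr : m < recipes.length := by omega
  have hget : ∀ j (hj : j < recipes.length),
      (((PySem.List.enumerate recipes).map (fun p => (p.2, p.1)))[j]'(by omega)) =
        (recipes[j], (j : Int)) := by
    intro j hj
    simp [PySem.List.getElem_enumerate]
  rw [hget m hmr] at hps
  have h1 : recipes[m] = r := congrArg Prod.fst hps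
  have h2 : i = (m : Int) := (congrArg Prod.snd hps).symm
  refine ⟨m, h2, hmr, h1, ?_⟩
  intro hmem
  obtain ⟨j, hj, hje⟩ := List.mem_iff_getElem.mp hmem
  have hjlen : m + 1 + j < recipes.length := by
    have := List.length_drop (l := recipes) (i := m + 1)
    omega
  have hje2 : recipes[m + 1 + j]'hjlen = r := by
    rw [← List.getElem_drop]
    exact hje
  exact htail (m + 1 + j) (by omega) (by omega) (by rw [hget (m + 1 + j) hjlen, hje2])

theorem pv_ridx_none_iff (recipes : List String) (r : String) :
    (pvRidx recipes).get? r = none ↔ r ∉ recipes := by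
  rw [PySem.Dict.get?_eq_none_iff_not_mem_keys]
  unfold pvRidx
  rw [PySem.Dict.keys_foldl_insert_key]
  simp [PySem.List.map_snd_enumerate, PySem.Set.mem_update, PySem.Dict.keys_empty]

-- ---- cookN basics ----

theorem pv_cookN_mono (recipes : List String) (ingredients : List (List String)) (supplies : List String)
    (k : Nat) (s : String) (h : pvCookN recipes ingredients supplies k s) :
    pvCookN recipes ingredients supplies (k + 1) s := by
  induction k generalizing s with
  | zero => exact Or.inl h
  | succ k ih =>
    rcases h with h | ⟨l, hf, hall⟩
    · exact Or.inl h
    · exact Or.inr ⟨l, hf, fun x hx => ih x (hall x hx)⟩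

theorem pv_cookN_le (recipes : List String) (ingredients : List (List String)) (supplies : List String)
    (j k : Nat) (hjk : j ≤ k) (s : String) (h : pvCookN recipes ingredients supplies j s) :
    pvCookN recipes ingredients supplies k s := by
  induction hjk with
  | refl => exact h
  | step _ ih => exact pv_cookN_mono recipes ingredients supplies _ s ih

theorem pv_cook_list (recipes : List String) (ingredients : List (List String)) (supplies : List String)
    (l : List String) (h : ∀ x ∈ l, pvCook recipes ingredients supplies x) :
    ∃ K, ∀ x ∈ l, pvCookN recipes ingredients supplies K x := by
  induction l with
  | nil => exact ⟨0, by simp⟩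
  | cons x xs ih =>
    obtain ⟨k, hk⟩ := h x (by simp)
    obtain ⟨K, hK⟩ := ih (fun y hy => h y (List.mem_cons_of_mem _ hy))
    refine ⟨max k K, ?_⟩
    intro y hy
    rcases List.mem_cons.mp hy with rfl | hy
    · exact pv_cookN_le recipes ingredients supplies k _ (Nat.le_max_left _ _) y hk
    · exact pv_cookN_le recipes ingredients supplies K _ (Nat.le_max_right _ _) y (hK y hy)

theorem pv_cook_step (recipes : List String) (ingredients : List (List String)) (supplies : List String)
    (r : String) (l : List String) (hf : pvF recipes ingredients r = some l)
    (h : ∀ x ∈ l, pvCook recipes ingredients supplies x) :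
    pvCook recipes ingredients supplies r := by
  obtain ⟨K, hK⟩ := pv_cook_list recipes ingredients supplies l h
  exact ⟨K + 1, Or.inr ⟨l, hf, hK⟩⟩

theorem pv_not_cook_step (recipes : List String) (ingredients : List (List String)) (supplies : List String)
    (r : String) (l : List String) (hs : r ∉ supplies)
    (hf : pvF recipes ingredients r = some l) (n : String) (hn : n ∈ l)
    (hnc : ¬ pvCook recipes ingredients supplies n) :
    ¬ pvCook recipes ingredients supplies r := by
  rintro ⟨k, hk⟩
  cases k with
  | zero => exact hs hk
  | succ k =>
    rcases hk with h | ⟨l', hf', hall⟩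
    · exact hs h
    · rw [hf] at hf'
      injection hf' with hf'
      subst hf'
      exact hnc ⟨k, hall n hn⟩

theorem pv_cookN_reach (recipes : List String) (ingredients : List (List String)) (supplies : List String)
    (x g : String) (hr : pvReach recipes ingredients supplies x g)
    (k : Nat) (h : pvCookN recipes ingredients supplies k x) :
    pvCookN recipes ingredients supplies k g := by
  induction hr using Relation.ReflTransGen.head_induction_on with
  | refl => exact h
  | head hab _ ih =>
    apply ih
    obtain ⟨hs, l, hf, hmem⟩ := hab
    cases k with
    | zero => exact absurd h hs
    | succ k =>
      rcases h with h | ⟨l', hf', hall⟩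
      · exact absurd h hs
      · rw [hf] at hf'
        injection hf' with hf'
        subst hf'
        exact pv_cookN_mono recipes ingredients supplies k _ (hall _ hmem)

theorem pv_cook_reach (recipes : List String) (ingredients : List (List String)) (supplies : List String)
    (x g : String) (hr : pvReach recipes ingredients supplies x g)
    (h : pvCook recipes ingredients supplies x) :
    pvCook recipes ingredients supplies g := by
  obtain ⟨k, hk⟩ := h
  exact ⟨k, pv_cookN_reach recipes ingredients supplies x g hr k hk⟩

theorem pv_cycle (recipes : List String) (ingredients : List (List String)) (supplies : List String)
    (r n : String) (he : pvE recipes ingredients supplies r n)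
    (hr : pvReach recipes ingredients supplies n r) :
    ¬ pvCook recipes ingredients supplies r := by
  rintro ⟨k, hk⟩
  induction k using Nat.strong_induction_on with
  | _ k ih =>
    obtain ⟨hs, l, hf, hmem⟩ := he
    cases k with
    | zero => exact hs hk
    | succ k =>
      rcases hk with h | ⟨l', hf', hall⟩
      · exact hs h
      · rw [hf] at hf'
        injection hf' with hf'
        subst hf'
        have hn : pvCookN recipes ingredients supplies k n := hall _ hmem
        exact ih k (Nat.lt_succ_self k)
          (pv_cookN_reach recipes ingredients supplies n r hr k hn)

-- ---- the DFS induction (A-side) ----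

def pvDfsPost (recipes : List String) (ingredients : List (List String)) (supplies : List String)
    (Γ : List String) (c : PySem.Dict String Bool) (r : String)
    (out : Bool × PySem.Dict String Bool) : Prop :=
  (∀ s v, c.get? s = some v → out.2.get? s = some v) ∧
  pvInv recipes ingredients supplies Γ out.2 ∧
  pvMeas recipes out.2 ≤ pvMeas recipes c ∧
  (out.1 = true → pvCook recipes ingredients supplies r) ∧
  (out.1 = true → ∀ s, out.2.get? s = some false → c.get? s = some false) ∧
  (out.1 = false → pvFb recipes ingredients supplies Γ r)

theorem pv_meas_insert_le (recipes : List String) (c : PySem.Dict String Bool) (r : String) (v : Bool) :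
    pvMeas recipes (c.insert r v) ≤ pvMeas recipes c := by
  apply pv_filter_not_length_le
  intro x _ hx
  rw [PySem.Dict.contains_eq_isSome_get?] at hx ⊢
  rw [PySem.Dict.get?_insert]
  split_ifs with h
  · rfl
  · exact hx

theorem pv_meas_insert_lt (recipes : List String) (c : PySem.Dict String Bool) (r : String) (v : Bool)
    (hr : r ∈ recipes) (hc : c.get? r = none) :
    pvMeas recipes (c.insert r v) < pvMeas recipes c := by
  apply pv_filter_not_length_lt _ _ _ (PySem.List.nodup_dedup recipes)
  · intro x _ hx
    rw [PySem.Dict.contains_eq_isSome_get?] at hx ⊢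
    rw [PySem.Dict.get?_insert]
    split_ifs with h
    · rfl
    · exact hx
  · exact (PySem.List.mem_dedup recipes r).mpr hr
  · rw [PySem.Dict.contains_eq_isSome_get?, hc]; rfl
  · rw [PySem.Dict.contains_eq_isSome_get?, PySem.Dict.get?_insert_self]; rfl

theorem pv_fb_weaken (recipes : List String) (ingredients : List (List String)) (supplies : List String)
    (Γ : List String) (r s : String) (h : pvFb recipes ingredients supplies Γ s) :
    pvFb recipes ingredients supplies (r :: Γ) s := by
  rcases h with h | ⟨g, hg, hreach⟩
  · exact Or.inl h
  · exact Or.inr ⟨g, List.mem_cons_of_mem _ hg, hreach⟩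

theorem pv_loop_spec (recipes : List String) (ingredients : List (List String)) (supplies : List String)
    (hPre : Pre_findAllRecipes recipes ingredients supplies) (fuel : Nat)
    (hdfs : ∀ Γ c r, pvInv recipes ingredients supplies Γ c → pvMeas recipes c < fuel →
      pvDfsPost recipes ingredients supplies Γ c r (pvDfsA ingredients (pvRidx recipes) fuel r c)) :
    ∀ (l : List String) Γ c, pvInv recipes ingredients supplies Γ c → pvMeas recipes c < fuel →
      (∀ s v, c.get? s = some v →
        (pvDfsALoop ingredients (pvRidx recipes) fuel l c).2.get? s = some v) ∧
      pvInv recipes ingredients supplies Γ (pvDfsALoop ingredients (pvRidx recipes) fuel l c).2 ∧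
      pvMeas recipes (pvDfsALoop ingredients (pvRidx recipes) fuel l c).2 ≤ pvMeas recipes c ∧
      ((pvDfsALoop ingredients (pvRidx recipes) fuel l c).1 = true →
        (∀ x ∈ l, pvCook recipes ingredients supplies x) ∧
        (∀ s, (pvDfsALoop ingredients (pvRidx recipes) fuel l c).2.get? s = some false →
          c.get? s = some false)) ∧
      ((pvDfsALoop ingredients (pvRidx recipes) fuel l c).1 = false →
        ∃ n ∈ l, pvFb recipes ingredients supplies Γ n) := by
  intro l
  induction l with
  | nil =>
    intro Γ c hInv hm
    simp only [pvDfsALoop]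
    exact ⟨fun s v h => h, hInv, Nat.le_refl _,
      fun _ => ⟨by simp, fun s h => h⟩, by simp⟩
  | cons n rest ih =>
    intro Γ c hInv hm
    have hd := hdfs Γ c n hInv hm
    unfold pvDfsPost at hd
    rcases hEq : pvDfsA ingredients (pvRidx recipes) fuel n c with ⟨b, c'⟩
    rw [hEq] at hd
    simp only at hd
    obtain ⟨hP, hI, hM, hT, hTF, hF⟩ := hd
    cases b with
    | false =>
      simp only [pvDfsALoop, hEq]
      exact ⟨hP, hI, hM, by simp, fun _ => ⟨n, by simp, hF rfl⟩⟩
    | true =>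
      simp only [pvDfsALoop, hEq]
      have hrest := ih Γ c' hI (by omega)
      obtain ⟨rP, rI, rM, rT, rF⟩ := hrest
      refine ⟨fun s v h => rP s v (hP s v h), rI, by omega, ?_, ?_⟩
      · intro hb
        obtain ⟨rT1, rT2⟩ := rT hb
        refine ⟨?_, fun s h => hTF rfl s (rT2 s h)⟩
        intro x hx
        rcases List.mem_cons.mp hx with rfl | hx
        · exact hT rfl
        · exact rT1 x hx
      · intro hb
        obtain ⟨m, hm', hfb⟩ := rF hb
        exact ⟨m, List.mem_cons_of_mem _ hm', hfb⟩

theorem pv_dfs_spec (recipes : List String) (ingredients : List (List String)) (supplies : List String)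
    (hPre : Pre_findAllRecipes recipes ingredients supplies) :
    ∀ (fuel : Nat) Γ c r, pvInv recipes ingredients supplies Γ c → pvMeas recipes c < fuel →
      pvDfsPost recipes ingredients supplies Γ c r (pvDfsA ingredients (pvRidx recipes) fuel r c) := by
  intro fuel
  induction fuel with
  | zero => intro Γ c r _ hm; omega
  | succ fuel ih =>
    intro Γ c r hInv hm
    obtain ⟨hSup, hTrue, hFalse⟩ := hInv
    unfold pvDfsPost
    simp only [pvDfsA]
    cases hc : c.get? r with
    | some b =>
      simp only
      cases b with
      | true =>
        exact ⟨fun s v h => h, ⟨hSup, hTrue, hFalse⟩, Nat.le_refl _,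
          fun _ => hTrue r hc, fun _ s h => h, by simp⟩
      | false =>
        exact ⟨fun s v h => h, ⟨hSup, hTrue, hFalse⟩, Nat.le_refl _,
          by simp, fun h => absurd h (by simp), fun _ => hFalse r hc⟩
    | none =>
      have hnsup : r ∉ supplies := fun hmem => by
        rw [hSup r hmem] at hc; simp at hc
      cases hri : (pvRidx recipes).get? r with
      | none =>
        have hnotrec : r ∉ recipes := (pv_ridx_none_iff recipes r).mp hri
        have hF : pvF recipes ingredients r = none := by
          unfold pvF; rw [hri]
        have hnc : ¬ pvCook recipes ingredients supplies r := by
          rintro ⟨k, hk⟩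
          cases k with
          | zero => exact hnsup hk
          | succ k =>
            rcases hk with h | ⟨l, hfl, _⟩
            · exact hnsup h
            · rw [hF] at hfl; simp at hfl
        exact ⟨fun s v h => h, ⟨hSup, hTrue, hFalse⟩, Nat.le_refl _,
          by simp, fun h => absurd h (by simp), fun _ => Or.inl hnc⟩
      | some i =>
        obtain ⟨n, hi, hn, hrn, hlast⟩ := pv_ridx_some_spec recipes r i hri
        subst hi
        have hnlen : n < ingredients.length := by
          by_contra hge
          rcases hPre n hn (by omega) with h1 | h1
          · rw [hrn] at h1; exact hnsup h1
          · rw [hrn] at h1; exact hlast h1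
        have hget : PySem.List.pyGet? ingredients (n : Int) = some (ingredients[n]'hnlen) := by
          rw [PySem.List.pyGet?_natCast]
          exact List.getElem?_eq_getElem hnlen
        have hF : pvF recipes ingredients r = some (ingredients[n]'hnlen) := by
          unfold pvF; rw [hri]; exact hget
        have hrrec : r ∈ recipes := hrn ▸ List.getElem_mem hn
        have hInv1 : pvInv recipes ingredients supplies (r :: Γ) (c.insert r false) := by
          refine ⟨?_, ?_, ?_⟩
          · intro s hs
            rw [PySem.Dict.get?_insert_of_ne _ _ (fun h => hnsup (by rw [← h]; exact hs))]
            exact hSup s hs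
          · intro s h
            rw [PySem.Dict.get?_insert] at h
            split_ifs at h with he
            · exact absurd h (by simp)
            · exact hTrue s h
          · intro s h
            rw [PySem.Dict.get?_insert] at h
            split_ifs at h with he
            · subst he
              exact Or.inr ⟨s, by simp, Relation.ReflTransGen.refl⟩
            · exact pv_fb_weaken recipes ingredients supplies Γ r s (hFalse s h)
        have hmeas1 : pvMeas recipes (c.insert r false) < fuel := by
          have := pv_meas_insert_lt recipes c r false hrrec hc
          omega
        have hloop := pv_loop_spec recipes ingredients supplies hPre fuel ih
          (ingredients[n]'hnlen) (r :: Γ) (c.insert r false) hInv1 hmeas1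
        dsimp only
        rw [hget]
        dsimp only
        rcases hEq : pvDfsALoop ingredients (pvRidx recipes) fuel (ingredients[n]'hnlen) (c.insert r false) with ⟨bl, c2⟩
        rw [hEq] at hloop
        dsimp only at hloop
        obtain ⟨lP, lI, lM, lT, lF⟩ := hloop
        have hPres : ∀ s v, c.get? s = some v → c2.get? s = some v := by
          intro s v h
          have hne : s ≠ r := fun he => by rw [he, hc] at h; simp at h
          apply lP
          rw [PySem.Dict.get?_insert_of_ne _ _ hne]
          exact h
        have hMle : pvMeas recipes c2 ≤ pvMeas recipes c := by
          have := pv_meas_insert_le recipes c r false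
          omega
        cases bl with
        | false =>
          dsimp only
          obtain ⟨nf, hnf, hfb⟩ := lF rfl
          have hEdge : pvE recipes ingredients supplies r nf :=
            ⟨hnsup, ingredients[n]'hnlen, hF, hnf⟩
          have hFbr : pvFb recipes ingredients supplies Γ r := by
            rcases hfb with hnc | ⟨g, hg, hreach⟩
            · exact Or.inl (pv_not_cook_step recipes ingredients supplies r _ hnsup hF nf hnf hnc)
            · rcases List.mem_cons.mp hg with hgr | hgΓ
              · rw [hgr] at hreach
                exact Or.inl (pv_cycle recipes ingredients supplies r nf hEdge hreach)
              · exact Or.inr ⟨g, hgΓ, Relation.ReflTransGen.head hEdge hreach⟩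
          obtain ⟨lI1, lI2, lI3⟩ := lI
          have hInvΓ : pvInv recipes ingredients supplies Γ c2 := by
            refine ⟨lI1, lI2, ?_⟩
            intro s h
            rcases lI3 s h with hncs | ⟨g, hg, hreach⟩
            · exact Or.inl hncs
            · rcases List.mem_cons.mp hg with hgr | hgΓ
              · rw [hgr] at hreach
                rcases hFbr with hncr | ⟨g', hg', hr'⟩
                · exact Or.inl (fun hcs => hncr (pv_cook_reach recipes ingredients supplies s r hreach hcs))
                · exact Or.inr ⟨g', hg', Relation.ReflTransGen.trans hreach hr'⟩
              · exact Or.inr ⟨g, hgΓ, hreach⟩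
          exact ⟨hPres, hInvΓ, hMle, fun h => absurd h (by simp),
            fun h => absurd h (by simp), fun _ => hFbr⟩
        | true =>
          dsimp only
          obtain ⟨hCookl, hNoNew⟩ := lT rfl
          have hCookr : pvCook recipes ingredients supplies r :=
            pv_cook_step recipes ingredients supplies r _ hF hCookl
          obtain ⟨lI1, lI2, lI3⟩ := lI
          have hOldFalse : ∀ s, (c2.insert r true).get? s = some false → c.get? s = some false := by
            intro s h
            rw [PySem.Dict.get?_insert] at h
            split_ifs at h with he
            · exact absurd h (by simp)
            · have h1 := hNoNew s h
              rw [PySem.Dict.get?_insert, if_neg he] at h1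
              exact h1
          refine ⟨?_, ⟨?_, ?_, ?_⟩, ?_, fun _ => hCookr, fun _ => hOldFalse, fun h => absurd h (by simp)⟩
          · intro s v h
            have hne : s ≠ r := fun he => by rw [he, hc] at h; simp at h
            rw [PySem.Dict.get?_insert_of_ne _ _ hne]
            exact hPres s v h
          · intro s hs
            have hne : s ≠ r := fun he => hnsup (he ▸ hs)
            rw [PySem.Dict.get?_insert_of_ne _ _ hne]
            exact lI1 s hs
          · intro s h
            rw [PySem.Dict.get?_insert] at h
            split_ifs at h with he
            · rw [he]; exact hCookr
            · exact lI2 s h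
          · intro s h
            exact hFalse s (hOldFalse s h)
          · have := pv_meas_insert_le recipes c2 r true
            omega

-- ---- B-side: the saturation reaches the least fixed point ----

def pvStep (av : PySem.Set String) (p : String × List String) : PySem.Set String :=
  if !(PySem.Set.contains av p.1) && p.2.all (fun x => PySem.Set.contains av x)
  then PySem.Set.add av p.1 else av

theorem pv_step_mono (av : PySem.Set String) (p : String × List String) (s : String)
    (h : s ∈ av) : s ∈ pvStep av p := by
  unfold pvStep
  split_ifs
  · exact (PySem.Set.mem_add _ _ _).mpr (Or.inl h)
  · exact h

theorem pv_foldl_step_mono (ps : List (String × List String)) (av : PySem.Set String)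
    (s : String) (h : s ∈ av) : s ∈ ps.foldl pvStep av := by
  induction ps generalizing av with
  | nil => exact h
  | cons p ps ih => exact ih (pvStep av p) (pv_step_mono av p s h)

theorem pv_foldl_step_complete (ps : List (String × List String)) (av : PySem.Set String)
    (r : String) (l : List String) (hm : (r, l) ∈ ps) (hing : ∀ x ∈ l, x ∈ av) :
    r ∈ ps.foldl pvStep av := by
  induction ps generalizing av with
  | nil => simp at hm
  | cons p ps ih =>
    rcases List.mem_cons.mp hm with rfl | hm'
    · refine pv_foldl_step_mono ps (pvStep av (r, l)) r ?_
      unfold pvStep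
      split_ifs with hcond
      · exact (PySem.Set.mem_add _ _ _).mpr (Or.inr rfl)
      · simp only [Bool.and_eq_true, Bool.not_eq_true'] at hcond
        by_cases hr : r ∈ av
        · exact hr
        · exfalso
          apply hcond
          constructor
          · cases hcb : PySem.Set.contains av r
            · rfl
            · exact absurd ((PySem.Set.contains_iff av r).mp hcb) hr
          · rw [List.all_eq_true]
            intro x hx
            exact (PySem.Set.contains_iff av x).mpr (hing x hx)
    · exact ih (pvStep av p) hm' (fun x hx => pv_step_mono av p x (hing x hx))

theorem pv_foldl_step_eq_or_grows (ps : List (String × List String)) (av : PySem.Set String) :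
    ps.foldl pvStep av = av ∨ ∃ k, (∃ p ∈ ps, k = p.1) ∧ k ∉ av ∧ k ∈ ps.foldl pvStep av := by
  induction ps generalizing av with
  | nil => exact Or.inl rfl
  | cons p ps ih =>
    by_cases hcond : (!(PySem.Set.contains av p.1) && p.2.all (fun x => PySem.Set.contains av x)) = true
    · refine Or.inr ⟨p.1, ⟨p, by simp, rfl⟩, ?_, ?_⟩
      · simp only [Bool.and_eq_true, Bool.not_eq_true'] at hcond
        intro hmem
        rw [(PySem.Set.contains_iff av p.1).mpr hmem] at hcond
        exact Bool.noConfusion hcond.1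
      · simp only [List.foldl_cons]
        apply pv_foldl_step_mono
        unfold pvStep
        rw [if_pos hcond]
        exact (PySem.Set.mem_add _ _ _).mpr (Or.inr rfl)
    · have hstep : pvStep av p = av := by unfold pvStep; rw [if_neg hcond]
      simp only [List.foldl_cons, hstep]
      rcases ih av with h | ⟨k, ⟨q, hq, hkq⟩, hk1, hk2⟩
      · exact Or.inl h
      · exact Or.inr ⟨k, ⟨q, List.mem_cons_of_mem _ hq, hkq⟩, hk1, hk2⟩

theorem pv_pass_eq_foldl (info : PySem.Dict String (List String)) (av : PySem.Set String) :
    pvPass info av = info.items.foldl pvStep av := rfl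

theorem pv_pass_mono (info : PySem.Dict String (List String)) (av : PySem.Set String)
    (s : String) (h : s ∈ av) : s ∈ pvPass info av := by
  rw [pv_pass_eq_foldl]
  exact pv_foldl_step_mono _ av s h

theorem pv_pass_complete (info : PySem.Dict String (List String)) (av : PySem.Set String)
    (r : String) (l : List String) (hm : (r, l) ∈ info.items)
    (hing : ∀ x ∈ l, x ∈ av) : r ∈ pvPass info av := by
  rw [pv_pass_eq_foldl]
  exact pv_foldl_step_complete _ av r l hm hing

theorem pv_pass_eq_or_grows (info : PySem.Dict String (List String)) (av : PySem.Set String) :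
    pvPass info av = av ∨ ∃ k, k ∈ info.keys ∧ k ∉ av ∧ k ∈ pvPass info av := by
  rw [pv_pass_eq_foldl]
  rcases pv_foldl_step_eq_or_grows info.items av with h | ⟨k, ⟨p, hp, hkp⟩, hk1, hk2⟩
  · exact Or.inl h
  · exact Or.inr ⟨k, hkp ▸ PySem.Dict.mem_keys_of_mem_items _ hp, hk1, hk2⟩

theorem pv_pass_fix_iterate (info : PySem.Dict String (List String)) (av : PySem.Set String)
    (h : pvPass info av = av) (m : Nat) : (pvPass info)^[m] av = av :=
  Function.iterate_fixed h m

theorem pv_iterate_fix (info : PySem.Dict String (List String)) (hk : info.keys.Nodup) :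
    ∀ (n : Nat) (av : PySem.Set String),
      (info.keys.filter (fun k => !(PySem.Set.contains av k))).length ≤ n →
      pvPass info ((pvPass info)^[n + 1] av) = (pvPass info)^[n + 1] av := by
  intro n
  induction n with
  | zero =>
    intro av hcount
    have hfix : pvPass info av = av := by
      rcases pv_pass_eq_or_grows info av with h | ⟨k, hk1, hk2, _⟩
      · exact h
      · exfalso
        have hmem : k ∈ info.keys.filter (fun k => !(PySem.Set.contains av k)) := by
          rw [List.mem_filter]
          refine ⟨hk1, ?_⟩
          rw [Bool.not_eq_eq_eq_not, Bool.not_true, ← Bool.not_eq_true]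
          intro hcon
          exact hk2 ((PySem.Set.contains_iff av k).mp hcon)
        rw [List.length_eq_zero_iff.mp (Nat.le_zero.mp hcount)] at hmem
        simp at hmem
    rw [pv_pass_fix_iterate info av hfix]
    exact hfix
  | succ n ih =>
    intro av hcount
    rcases pv_pass_eq_or_grows info av with hfix | ⟨k, hk1, hk2, hk3⟩
    · rw [pv_pass_fix_iterate info av hfix]
      exact hfix
    · have hlt : (info.keys.filter (fun k => !(PySem.Set.contains (pvPass info av) k))).length ≤ n := by
        have := pv_filter_not_length_lt info.keys
          (fun k => PySem.Set.contains av k) (fun k => PySem.Set.contains (pvPass info av) k)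
          hk (fun x _ hx => (PySem.Set.contains_iff _ x).mpr
            (pv_pass_mono info av x ((PySem.Set.contains_iff av x).mp hx)))
          k hk1 (by rw [← Bool.not_eq_true, PySem.Set.contains_iff]; exact hk2)
          ((PySem.Set.contains_iff _ k).mpr hk3)
        beta_reduce at this
        omega
      have hstep : (pvPass info)^[n + 1 + 1] av = (pvPass info)^[n + 1] (pvPass info av) := by
        rw [Function.iterate_succ_apply]
      rw [hstep]
      exact ih (pvPass info av) hlt

-- ---- info/pvF bridge (under Pre_) ----

theorem pv_info_get?_eq (recipes : List String) (ingredients : List (List String)) (supplies : List String)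
    (hPre : Pre_findAllRecipes recipes ingredients supplies) (r : String) (hs : r ∉ supplies) :
    (pvInfo recipes ingredients).get? r = pvF recipes ingredients r := by
  cases hf : pvF recipes ingredients r with
  | none =>
    rw [PySem.Dict.get?_eq_none_iff_not_mem_keys]
    intro hmem
    have hkeys : (pvInfo recipes ingredients).keys =
        PySem.Set.update PySem.Dict.empty.keys
          ((recipes.zip ingredients).map (fun p : String × List String => p.1)) :=
      PySem.Dict.keys_foldl_insert_key (recipes.zip ingredients)
        (fun p : String × List String => p.1)
        (fun (_ : PySem.Dict String (List String)) (p : String × List String) => p.2)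
        PySem.Dict.empty
    rw [hkeys, PySem.Dict.keys_empty, PySem.Set.update_nil_left, PySem.Set.mem_ofList] at hmem
    obtain ⟨p, hp, hpr⟩ := List.mem_map.mp hmem
    obtain ⟨j, hj, hjp⟩ := List.mem_iff_getElem.mp hp
    have hjr : j < recipes.length := by
      rw [List.length_zip] at hj; omega
    have hrj : recipes[j]'hjr = r := by
      rw [List.getElem_zip] at hjp
      rw [← hpr, ← hjp]
    have hrrec : r ∈ recipes := hrj ▸ List.getElem_mem hjr
    unfold pvF at hf
    cases hri : (pvRidx recipes).get? r with
    | none => exact (pv_ridx_none_iff recipes r).mp hri hrrec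
    | some i =>
      rw [hri] at hf
      obtain ⟨n, rfl, hn, hrn, hlast⟩ := pv_ridx_some_spec recipes r i hri
      dsimp only at hf
      rw [PySem.List.pyGet?_natCast] at hf
      have hge : ingredients.length ≤ n := by
        by_contra hlt
        push_neg at hlt
        rw [List.getElem?_eq_getElem hlt] at hf
        simp at hf
      rcases hPre n hn hge with h1 | h1
      · exact hs (hrn ▸ h1)
      · exact hlast (hrn ▸ h1)
  | some l =>
    unfold pvF at hf
    cases hri : (pvRidx recipes).get? r with
    | none => rw [hri] at hf; simp at hf
    | some i =>
      rw [hri] at hf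
      dsimp only at hf
      obtain ⟨n, rfl, hn, hrn, hlast⟩ := pv_ridx_some_spec recipes r i hri
      rw [PySem.List.pyGet?_natCast] at hf
      have hnlen : n < ingredients.length := by
        by_contra hge
        push_neg at hge
        rw [List.getElem?_eq_none hge] at hf
        simp at hf
      have hl : ingredients[n]'hnlen = l := by
        rw [List.getElem?_eq_getElem hnlen] at hf
        injection hf
      show (pvInfo recipes ingredients).get? r = some l
      unfold pvInfo
      apply (pv_get?_foldl_insert_pairs _ r l).mpr
      have hzlen : n < (recipes.zip ingredients).length := by
        rw [List.length_zip]; omega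
      refine ⟨n, hzlen, ?_, ?_⟩
      · rw [List.getElem_zip, hrn, hl]
      · intro j hj hj2
        rw [List.getElem_zip]
        have hjr : j < recipes.length := by
          rw [List.length_zip] at hj2; omega
        intro heq
        apply hlast
        apply List.mem_iff_getElem.mpr
        have hlen2 : j - (n + 1) < (recipes.drop (n + 1)).length := by
          rw [List.length_drop]; omega
        refine ⟨j - (n + 1), hlen2, ?_⟩
        rw [List.getElem_drop]
        have hidx : n + 1 + (j - (n + 1)) = j := by omega
        simp only [hidx]
        exact heq

theorem pv_info_keys_nodup (recipes : List String) (ingredients : List (List String)) :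
    (pvInfo recipes ingredients).keys.Nodup := by
  have h : (pvInfo recipes ingredients).keys.Nodup :=
    PySem.Dict.nodup_keys_foldl_insert_key (recipes.zip ingredients)
      (fun p : String × List String => p.1)
      (fun (_ : PySem.Dict String (List String)) (p : String × List String) => p.2)
      PySem.Dict.empty (by rw [PySem.Dict.keys_empty]; exact List.nodup_nil)
  exact h

theorem pv_info_keys_len (recipes : List String) (ingredients : List (List String)) :
    (pvInfo recipes ingredients).keys.length ≤ recipes.length := by
  have hkeys : (pvInfo recipes ingredients).keys =
      PySem.Set.update PySem.Dict.empty.keys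
        ((recipes.zip ingredients).map (fun p : String × List String => p.1)) :=
    PySem.Dict.keys_foldl_insert_key (recipes.zip ingredients)
      (fun p : String × List String => p.1)
      (fun (_ : PySem.Dict String (List String)) (p : String × List String) => p.2)
      PySem.Dict.empty
  rw [hkeys, PySem.Dict.keys_empty, PySem.Set.update_nil_left]
  calc (PySem.Set.ofList ((recipes.zip ingredients).map (fun p : String × List String => p.1))).length
      ≤ ((recipes.zip ingredients).map (fun p : String × List String => p.1)).length :=
        PySem.Set.length_ofList_le _
    _ ≤ recipes.length := by rw [List.length_map, List.length_zip]; omega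

-- ---- the final available set equals cookability ----

def pvFinal (recipes : List String) (ingredients : List (List String)) (supplies : List String) : PySem.Set String :=
  (pvPass (pvInfo recipes ingredients))^[recipes.length + 1] (PySem.Set.ofList supplies)

theorem pv_final_sound (recipes : List String) (ingredients : List (List String)) (supplies : List String)
    (hPre : Pre_findAllRecipes recipes ingredients supplies) (s : String)
    (h : s ∈ pvFinal recipes ingredients supplies) : pvCook recipes ingredients supplies s := by
  have hitems : ∀ p ∈ (pvInfo recipes ingredients).items,
      p.1 ∈ supplies ∨ pvF recipes ingredients p.1 = some p.2 := by
    rintro ⟨k, v⟩ hp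
    by_cases hks : k ∈ supplies
    · exact Or.inl hks
    · right
      have hget := PySem.Dict.get?_of_mem_items _ hp (pv_info_keys_nodup recipes ingredients)
      rw [pv_info_get?_eq recipes ingredients supplies hPre k hks] at hget
      exact hget
  have hfold : ∀ (ps : List (String × List String)),
      (∀ p ∈ ps, p.1 ∈ supplies ∨ pvF recipes ingredients p.1 = some p.2) →
      ∀ av, (∀ t ∈ av, pvCook recipes ingredients supplies t) →
      ∀ t ∈ ps.foldl pvStep av, pvCook recipes ingredients supplies t := by
    intro ps
    induction ps with
    | nil => intro _ av hav t ht; exact hav t ht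
    | cons p ps ih =>
      intro hps av hav t ht
      refine ih (fun q hq => hps q (List.mem_cons_of_mem _ hq)) (pvStep av p) ?_ t ht
      intro u hu
      unfold pvStep at hu
      split_ifs at hu with hcond
      · rcases (PySem.Set.mem_add _ _ _).mp hu with hu | rfl
        · exact hav u hu
        · rcases hps p (by simp) with hsup | hfp
          · exact ⟨0, by simp only [pvCookN]; exact hsup⟩
          · simp only [Bool.and_eq_true] at hcond
            apply pv_cook_step recipes ingredients supplies p.1 p.2 hfp
            intro x hx
            apply hav
            rw [← PySem.Set.contains_iff]
            exact List.all_eq_true.mp hcond.2 x hx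
      · exact hav u hu
  have hiter : ∀ (m : Nat) (av : PySem.Set String),
      (∀ t ∈ av, pvCook recipes ingredients supplies t) →
      ∀ t ∈ (pvPass (pvInfo recipes ingredients))^[m] av, pvCook recipes ingredients supplies t := by
    intro m
    induction m with
    | zero => intro av hav t ht; exact hav t ht
    | succ m ih =>
      intro av hav t ht
      rw [Function.iterate_succ_apply] at ht
      exact ih _ (hfold _ hitems av hav) t ht
  apply hiter (recipes.length + 1) (PySem.Set.ofList supplies) ?_ s h
  intro t ht
  exact ⟨0, by simp only [pvCookN]; exact (PySem.Set.mem_ofList _ _).mp ht⟩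

theorem pv_final_complete (recipes : List String) (ingredients : List (List String)) (supplies : List String)
    (hPre : Pre_findAllRecipes recipes ingredients supplies) (s : String)
    (h : pvCook recipes ingredients supplies s) : s ∈ pvFinal recipes ingredients supplies := by
  have hup : ∀ (m : Nat) (av : PySem.Set String) (t : String), t ∈ av →
      t ∈ (pvPass (pvInfo recipes ingredients))^[m] av := by
    intro m
    induction m with
    | zero => intro av t ht; exact ht
    | succ m ih =>
      intro av t ht
      rw [Function.iterate_succ_apply]
      exact ih _ t (pv_pass_mono _ av t ht)
  have hfix : pvPass (pvInfo recipes ingredients) (pvFinal recipes ingredients supplies) =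
      pvFinal recipes ingredients supplies := by
    apply pv_iterate_fix (pvInfo recipes ingredients) (pv_info_keys_nodup recipes ingredients)
      recipes.length (PySem.Set.ofList supplies)
    calc ((pvInfo recipes ingredients).keys.filter
          (fun k => !(PySem.Set.contains (PySem.Set.ofList supplies) k))).length
        ≤ (pvInfo recipes ingredients).keys.length := List.length_filter_le _ _
      _ ≤ recipes.length := pv_info_keys_len recipes ingredients
  suffices haux : ∀ (k : Nat) (t : String), pvCookN recipes ingredients supplies k t →
      t ∈ pvFinal recipes ingredients supplies by
    obtain ⟨k, hk⟩ := h
    exact haux k s hk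
  intro k
  induction k with
  | zero =>
    intro t ht
    simp only [pvCookN] at ht
    exact hup _ _ t ((PySem.Set.mem_ofList _ _).mpr ht)
  | succ k ih =>
    intro t ht
    rcases ht with hsup | ⟨l, hfl, hall⟩
    · exact hup _ _ t ((PySem.Set.mem_ofList _ _).mpr hsup)
    · by_cases hts : t ∈ supplies
      · exact hup _ _ t ((PySem.Set.mem_ofList _ _).mpr hts)
      · have hinfo : (pvInfo recipes ingredients).get? t = some l := by
          rw [pv_info_get?_eq recipes ingredients supplies hPre t hts]
          exact hfl
        have hitem : (t, l) ∈ (pvInfo recipes ingredients).items :=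
          PySem.Dict.mem_items_of_get?_eq_some _ hinfo
        have hx : ∀ x ∈ l, x ∈ pvFinal recipes ingredients supplies :=
          fun x hxl => ih x (hall x hxl)
        have := pv_pass_complete (pvInfo recipes ingredients)
          (pvFinal recipes ingredients supplies) t l hitem hx
        rwa [hfix] at this

theorem pv_alt_eq_filter (recipes : List String) (ingredients : List (List String)) (supplies : List String) :
    findAllRecipes_alt recipes ingredients supplies =
      recipes.filter (fun r => PySem.Set.contains (pvFinal recipes ingredients supplies) r) := by
  have hconst : ∀ (g : PySem.Set String → PySem.Set String) (n : Nat) (a : Int) (x : PySem.Set String),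
      (PySem.List.pyRange a (a + (n : Int)) 1).foldl (fun y _ => g y) x = g^[n] x := by
    intro g n
    induction n with
    | zero =>
      intro a x
      simp [PySem.List.pyRange]
    | succ n ih =>
      intro a x
      rw [PySem.List.pyRange_one_cons (by omega : a < a + ((n : Nat) + 1 : Nat))]
      simp only [List.foldl_cons]
      have harith : a + (((n : Nat) + 1 : Nat) : Int) = (a + 1) + (n : Int) := by push_cast; ring
      rw [harith, ih (a + 1) (g x)]
      rw [← Function.iterate_succ_apply]
  unfold findAllRecipes_alt
  dsimp only
  have harith2 : (recipes.length : Int) + 1 = 0 + ((recipes.length + 1 : Nat) : Int) := by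
    push_cast; ring
  rw [harith2, hconst (pvPass (pvInfo recipes ingredients)) (recipes.length + 1) 0
    (PySem.Set.ofList supplies)]
  rfl

theorem pv_a_eq_filter (recipes : List String) (ingredients : List (List String)) (supplies : List String)
    (hPre : Pre_findAllRecipes recipes ingredients supplies) :
    findAllRecipes recipes ingredients supplies =
      recipes.filter (fun r => PySem.Set.contains (pvFinal recipes ingredients supplies) r) := by
  have htop : ∀ (rs : List String) (c : PySem.Dict String Bool) (acc : List String),
      pvInv recipes ingredients supplies [] c → pvMeas recipes c < recipes.length + 1 →
      (rs.foldl (fun (st : PySem.Dict String Bool × List String) r =>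
          ((pvDfsA ingredients (pvRidx recipes) (recipes.length + 1) r st.1).2,
            if (pvDfsA ingredients (pvRidx recipes) (recipes.length + 1) r st.1).1
            then st.2 ++ [r] else st.2)) (c, acc)).2
        = acc ++ rs.filter (fun r => PySem.Set.contains (pvFinal recipes ingredients supplies) r) := by
    intro rs
    induction rs with
    | nil => intro c acc _ _; simp
    | cons r rs ih =>
      intro c acc hInv hm
      have hd := pv_dfs_spec recipes ingredients supplies hPre (recipes.length + 1) [] c r hInv hm
      unfold pvDfsPost at hd
      rcases hEq : pvDfsA ingredients (pvRidx recipes) (recipes.length + 1) r c with ⟨b, c'⟩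
      rw [hEq] at hd
      dsimp only at hd
      obtain ⟨hP, hI, hM, hT, hTF, hF⟩ := hd
      have hb : b = PySem.Set.contains (pvFinal recipes ingredients supplies) r := by
        cases b with
        | true =>
          symm
          rw [PySem.Set.contains_iff]
          exact pv_final_complete recipes ingredients supplies hPre r (hT rfl)
        | false =>
          symm
          cases hcb : PySem.Set.contains (pvFinal recipes ingredients supplies) r
          · rfl
          · exfalso
            have hcook := pv_final_sound recipes ingredients supplies hPre r
              ((PySem.Set.contains_iff _ r).mp hcb)
            rcases hF rfl with hnc | ⟨g, hg, _⟩
            · exact hnc hcook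
            · simp at hg
      rw [List.foldl_cons]
      rw [hEq, List.filter_cons, ← hb]
      cases b with
      | true =>
        rw [if_pos rfl, if_pos rfl]
        rw [ih c' (acc ++ [r]) hI (by omega)]
        simp
      | false =>
        rw [if_neg (by simp : ¬ (false = true)), if_neg (by simp : ¬ (false = true))]
        rw [ih c' acc hI (by omega)]
  have hInv0 : pvInv recipes ingredients supplies [] (pvCanCook0 supplies) := by
    refine ⟨?_, ?_, ?_⟩
    · intro t ht
      rw [pv_canCook0_get?]
      simp [ht]
    · intro t ht
      rw [pv_canCook0_get?] at ht
      split_ifs at ht with hts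
      exact ⟨0, by simp only [pvCookN]; exact hts⟩
    · intro t ht
      rw [pv_canCook0_get?] at ht
      split_ifs at ht
      simp at ht
  have hm0 : pvMeas recipes (pvCanCook0 supplies) < recipes.length + 1 := by
    unfold pvMeas
    calc ((PySem.List.dedup recipes).filter (fun r => !((pvCanCook0 supplies).contains r))).length
        ≤ (PySem.List.dedup recipes).length := List.length_filter_le _ _
      _ ≤ recipes.length := by
          rw [PySem.List.dedup_eq_ofList]
          exact PySem.Set.length_ofList_le _
      _ < recipes.length + 1 := Nat.lt_succ_self _
  unfold findAllRecipes
  dsimp only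
  rw [htop recipes (pvCanCook0 supplies) [] hInv0 hm0]
  rw [List.nil_append]

-- ===== VERDICT (by name: the statement is the Claim_ definition above) =====
theorem findAllRecipes_spec : Claim_equal_findAllRecipes := by
  intro recipes ingredients supplies _ hPre
  unfold Spec_findAllRecipes
  rw [pv_a_eq_filter recipes ingredients supplies hPre, pv_alt_eq_filter]
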